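-- pv_equiv track=rewrite | github.com/jcolinpatrick/kryptos | scripts/e_grille_07_autokey_hill_combo.py | autokey_pt_beau_decrypt
-- ===== SOURCE A (Python) =====
-- ALPH = "ABCDEFGHIJKLMNOPQRSTUVWXYZ"
--
-- ALPH_IDX = {c: i for i, c in enumerate(ALPH)}
--
-- def autokey_pt_beau_decrypt(ct_str: str, primer: str) -> str:
--     """PT-autokey Beaufort: key extends with plaintext chars."""
--     pt = []
--     key = list(primer)
--     for i, c in enumerate(ct_str):
--         ci = ALPH_IDX[c]
--         ki = ALPH_IDX[key[i]]
--         p = ALPH[(ki - ci) % 26]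
--         pt.append(p)
--         key.append(p)
--     return "".join(pt)
-- ===== SOURCE B (Python) =====
-- ALPH = "ABCDEFGHIJKLMNOPQRSTUVWXYZ"
--
-- ALPH_IDX = {c: i for i, c in enumerate(ALPH)}
--
-- def autokey_pt_beau_decrypt(ct_str: str, primer: str) -> str:
--     """PT-autokey Beaufort, closed form: unrolling p[i] = p[i-m] - c[i] gives
--     p[i] = primer[i % m] - sum of the ciphertext letters on i's stride chain
--     (positions i % m, i % m + m, ..., i), all mod 26.  Each output letter is
--     computed independently from that closed form; no key stream is carried."""
--     m = len(primer)
--     out = []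
--     for i in range(len(ct_str)):
--         r = i % m
--         s = ALPH_IDX[primer[r]]
--         for j in range(r, i + 1, m):
--             s -= ALPH_IDX[ct_str[j]]
--         out.append(ALPH[s % 26])
--     return "".join(out)
-- ===== Notes on version B (the rewrite author's own statement) =====
-- stated objective: alternative
-- what changed: B discards A's carried autokey stream (the growing key list) entirely: unrolling the recurrence p[i] = p[i-m] - c[i] gives the closed form p[i] = primer[i % m] - sum of ciphertext letters on i's stride chain (mod 26), and B computes every output letter independently from that closed form with a per-position inner sum.
import Mathlib
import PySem

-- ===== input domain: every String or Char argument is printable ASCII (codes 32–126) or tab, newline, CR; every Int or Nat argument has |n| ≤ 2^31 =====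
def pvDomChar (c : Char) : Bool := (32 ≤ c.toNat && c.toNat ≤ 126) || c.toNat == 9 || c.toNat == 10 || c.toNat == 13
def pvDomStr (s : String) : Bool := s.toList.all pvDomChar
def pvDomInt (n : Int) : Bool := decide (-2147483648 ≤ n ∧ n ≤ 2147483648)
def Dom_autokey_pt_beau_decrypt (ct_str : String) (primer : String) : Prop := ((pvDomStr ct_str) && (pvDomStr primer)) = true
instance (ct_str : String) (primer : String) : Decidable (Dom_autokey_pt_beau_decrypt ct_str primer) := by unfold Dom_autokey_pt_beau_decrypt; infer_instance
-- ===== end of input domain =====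

-- B replaces A's carried key stream by the closed form p[i] = primer[i % m] - Σ ct[j]
-- over i's stride chain, each letter computed independently (objective: alternative).

-- ===== PORT A =====
def pvALPH : List Char := "ABCDEFGHIJKLMNOPQRSTUVWXYZ".toList

def pvALPH_IDX : PySem.Dict Char Int :=
  (PySem.List.enumerate pvALPH).foldl (fun d p => d.insert p.2 p.1) PySem.Dict.empty

-- `none` = the Python loop raises (KeyError / IndexError); excluded by Pre_.
def pvLoopA : List (Int × Char) → List Char → List Char → Option (List Char)
  | [], pt, _ => some pt
  | (i, c) :: rest, pt, key =>
    match pvALPH_IDX.get? c with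
    | none => none
    | some ci =>
      match PySem.List.pyGet? key i with
      | none => none
      | some kc =>
        match pvALPH_IDX.get? kc with
        | none => none
        | some ki =>
          match PySem.List.pyGet? pvALPH (PySem.Int.mod (ki - ci) 26) with
          | none => none
          | some p => pvLoopA rest (pt ++ [p]) (key ++ [p])

def autokey_pt_beau_decrypt (ct_str : String) (primer : String) : String :=
  match pvLoopA (PySem.List.enumerate ct_str.toList) [] primer.toList with
  | some pt => String.ofList pt
  | none => ""   -- unreachable under Pre_ (Python raises there)

-- ===== PORT B =====
-- inner loop 'for j in range(r, i+1, m): s -= ALPH_IDX[ct_str[j]]'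
def pvChainB (ct : List Char) : List Int → Int → Option Int
  | [], s => some s
  | j :: rest, s =>
    match PySem.List.pyGet? ct j with
    | none => none
    | some c =>
      match pvALPH_IDX.get? c with
      | none => none
      | some ci => pvChainB ct rest (s - ci)

-- outer loop 'for i in range(len(ct_str))'; `none` = the Python raises
-- (ZeroDivisionError at i % m when m = 0, KeyError on a non-letter); excluded by Pre_.
def pvOuterB (ct prim : List Char) (m : Int) : List Int → List Char → Option (List Char)
  | [], out => some out
  | i :: rest, out =>
    match PySem.Int.mod? i m with
    | none => none
    | some r =>
      match PySem.List.pyGet? prim r with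
      | none => none
      | some pc =>
        match pvALPH_IDX.get? pc with
        | none => none
        | some s0 =>
          match pvChainB ct (PySem.List.pyRange r (i + 1) m) s0 with
          | none => none
          | some s =>
            match PySem.List.pyGet? pvALPH (PySem.Int.mod s 26) with
            | none => none
            | some p => pvOuterB ct prim m rest (out ++ [p])

def autokey_pt_beau_decrypt_alt (ct_str : String) (primer : String) : String :=
  match pvOuterB ct_str.toList primer.toList (primer.toList.length : Int)
      (PySem.List.pyRange 0 (ct_str.toList.length : Int) 1) [] with
  | some out => String.ofList out
  | none => ""   -- unreachable under Pre_ (Python raises there)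

-- ===== PRECONDITION & SPEC =====
def pvLet (c : Char) : Bool := (pvALPH_IDX.get? c).isSome

-- Pre_ is exactly the inputs on which Python A returns: every ciphertext char and every
-- primer char the loop reads (the first len(ct) of them) is an uppercase letter, and the
-- primer is nonempty when the ciphertext is (else key[0] raises IndexError).
def Pre_autokey_pt_beau_decrypt (ct_str : String) (primer : String) : Prop :=
  ct_str.toList.all pvLet = true ∧
  (primer.toList.take ct_str.toList.length).all pvLet = true ∧
  (ct_str.toList ≠ [] → primer.toList ≠ [])
instance (ct_str : String) (primer : String) : Decidable (Pre_autokey_pt_beau_decrypt ct_str primer) := by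
  unfold Pre_autokey_pt_beau_decrypt; infer_instance

def pvWitness_autokey_pt_beau_decrypt : String × String := ("AB", "KEY")

def Spec_autokey_pt_beau_decrypt (ct_str : String) (primer : String) (out : String) : Prop := out = autokey_pt_beau_decrypt_alt ct_str primer
instance (ct_str : String) (primer : String) (out : String) : Decidable (Spec_autokey_pt_beau_decrypt ct_str primer out) := by unfold Spec_autokey_pt_beau_decrypt; infer_instance

-- ===== CLAIM (what is proved, stated in full; the proofs are below) =====
def Claim_equal_autokey_pt_beau_decrypt : Prop := ∀ (ct_str : String) (primer : String), Dom_autokey_pt_beau_decrypt ct_str primer → Pre_autokey_pt_beau_decrypt ct_str primer → Spec_autokey_pt_beau_decrypt ct_str primer (autokey_pt_beau_decrypt ct_str primer)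

-- ===== LEMMAS AND PROOFS =====

-- the common reference sequence: plaintext letter k is pvChr (pvF k)
def pvIdx (c : Char) : Int := (pvALPH_IDX.get? c).getD 0
def pvChr (v : Int) : Char := pvALPH.getD v.toNat 'A'
def pvChain (m n : Nat) : List Int := PySem.List.pyRange ((n % m : Nat) : Int) ((n : Int) + 1) (m : Int)
def pvF (ct prim : List Char) (m n : Nat) : Int :=
  PySem.Int.mod
    (pvIdx (prim.getD (n % m) 'A') - ((pvChain m n).map (fun j => pvIdx (ct.getD j.toNat 'A'))).sum) 26
def ptSpec (ct prim : List Char) (m n : Nat) : List Char :=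
  (List.range n).map (fun k => pvChr (pvF ct prim m k))

lemma pvLet_get (c : Char) (h : pvLet c = true) : pvALPH_IDX.get? c = some (pvIdx c) := by
  unfold pvLet at h; unfold pvIdx
  cases hx : pvALPH_IDX.get? c <;> simp_all

lemma idx_chr (v : Int) (h0 : 0 ≤ v) (h1 : v < 26) :
    PySem.List.pyGet? pvALPH v = some (pvChr v) ∧ pvALPH_IDX.get? (pvChr v) = some v := by
  lift v to ℕ using h0
  have hv : v < 26 := by exact_mod_cast h1
  interval_cases v <;> exact ⟨by decide, by decide⟩

lemma pvF_bounds (ct prim : List Char) (m n : Nat) : 0 ≤ pvF ct prim m n ∧ pvF ct prim m n < 26 :=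
  ⟨PySem.Int.mod_nonneg _ (by norm_num), PySem.Int.mod_lt _ (by norm_num)⟩

lemma ptSpec_succ (ct prim : List Char) (m n : Nat) :
    ptSpec ct prim m (n + 1) = ptSpec ct prim m n ++ [pvChr (pvF ct prim m n)] := by
  simp [ptSpec, List.range_succ]

lemma ptSpec_getElem? (ct prim : List Char) (m n k : Nat) (hk : k < n) :
    (ptSpec ct prim m n)[k]? = some (pvChr (pvF ct prim m k)) := by
  simp [ptSpec, List.getElem?_map, List.getElem?_range hk]

-- chain structure
lemma chain_singleton (m n : Nat) (hm : 0 < m) (h : n < m) : pvChain m n = [(n : Int)] := by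
  unfold pvChain
  rw [Nat.mod_eq_of_lt h, PySem.List.pyRange_of_pos _ _ (by exact_mod_cast hm : (0:Int) < (m:Int))]
  have h1 : ((n : Int)) < (n : Int) + 1 := by omega
  rw [if_pos h1]
  have h2 : ((n : Int) + 1 - (n : Int) + (m : Int) - 1) = (m : Int) := by ring
  rw [h2, Int.ediv_self (by exact_mod_cast hm.ne' : ((m:Nat):Int) ≠ 0)]
  simp

lemma chain_split (m n : Nat) (hm : 0 < m) (hmn : m ≤ n) :
    pvChain m n = pvChain m (n - m) ++ [(n : Int)] := by
  unfold pvChain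
  have hmZ : (0:Int) < (m:Int) := by exact_mod_cast hm
  have hmod : (n - m) % m = n % m := (Nat.mod_eq_sub_mod hmn).symm
  rw [hmod]
  set r := n % m with hr
  have hrm : r < m := Nat.mod_lt _ hm
  have hrn : r ≤ n := Nat.mod_le n m
  have hdvdN : m ∣ n - r := by
    have h1 : m * (n / m) + r = n := Nat.div_add_mod n m
    exact ⟨n / m, by omega⟩
  have hdvd : (m:Int) ∣ ((n:Int) - (r:Int)) := by
    have : ((n:Int) - (r:Int)) = ((n - r : Nat) : Int) := by omega
    rw [this]; exact_mod_cast hdvdN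
  have hpos : (0:Int) < (n:Int) - (r:Int) := by omega
  have hge : (m:Int) ≤ (n:Int) - (r:Int) := Int.le_of_dvd hpos hdvd
  rw [PySem.List.pyRange_of_pos _ _ hmZ, PySem.List.pyRange_of_pos _ _ hmZ]
  have hlt1 : ((r:Int)) < (n:Int) + 1 := by omega
  have hlt2 : ((r:Int)) < ((n - m : Nat) : Int) + 1 := by omega
  rw [if_pos hlt1, if_pos hlt2]
  set qZ := ((n:Int) - (r:Int)) / (m:Int) with hqZ
  have hq0 : 0 ≤ qZ := Int.ediv_nonneg (by omega) (by omega)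
  have hqm : (m:Int) * qZ = (n:Int) - (r:Int) := Int.mul_ediv_cancel' hdvd
  have hc1 : ((n:Int) + 1 - (r:Int) + (m:Int) - 1) = ((n:Int) - (r:Int)) + 1 * (m:Int) := by ring
  have hc2 : (((n - m : Nat) : Int) + 1 - (r:Int) + (m:Int) - 1) = (n:Int) - (r:Int) := by omega
  rw [hc1, hc2, Int.add_mul_ediv_right _ _ (by omega : (m:Int) ≠ 0)]
  have ht1 : (qZ + 1).toNat = qZ.toNat + 1 := by omega
  rw [← hqZ, ht1, List.range_succ, List.map_append]
  congr 1
  simp only [List.map_cons, List.map_nil]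
  congr 1
  have : (qZ.toNat : Int) = qZ := by omega
  rw [this]
  omega

-- sum over a chain, as pvChainB computes it
lemma chainB_spec (ct : List Char) : ∀ (l : List Int) (s : Int),
    (∀ j ∈ l, 0 ≤ j ∧ j.toNat < ct.length ∧ pvLet (ct.getD j.toNat 'A') = true) →
    pvChainB ct l s = some (s - (l.map (fun j => pvIdx (ct.getD j.toNat 'A'))).sum) := by
  intro l
  induction l with
  | nil => intro s _; simp [pvChainB]
  | cons j rest ih =>
    intro s h
    obtain ⟨hj0, hjl, hjlet⟩ := h j (List.mem_cons_self ..)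
    have hjc : j = ((j.toNat : Nat) : Int) := by omega
    unfold pvChainB
    rw [hjc, PySem.List.pyGet?_natCast, List.getElem?_eq_getElem hjl]
    have hgd : ct[j.toNat] = ct.getD j.toNat 'A' := (List.getD_eq_getElem ct 'A' hjl).symm
    rw [hgd]
    simp only [pvLet_get _ hjlet]
    rw [ih _ (fun x hx => h x (List.mem_cons_of_mem _ hx))]
    simp only [List.map_cons, List.sum_cons, Option.some.injEq, Int.toNat_natCast]
    ring

-- A's loop splits over an append of its enumerated input (key = primer ++ plaintext-so-far)
lemma loopA_append (e1 : List (Int × Char)) (e2 : List (Int × Char)) :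
    ∀ (pt primL : List Char),
    pvLoopA (e1 ++ e2) pt (primL ++ pt) =
      (pvLoopA e1 pt (primL ++ pt)).bind (fun pt' => pvLoopA e2 pt' (primL ++ pt')) := by
  induction e1 with
  | nil => intro pt primL; simp [pvLoopA]
  | cons ic rest ih =>
    intro pt primL
    obtain ⟨i, c⟩ := ic
    simp only [List.cons_append]
    simp only [pvLoopA]
    cases hci : pvALPH_IDX.get? c with
    | none => rfl
    | some ci =>
      cases hkc : PySem.List.pyGet? (primL ++ pt) i with
      | none => rfl
      | some kc =>
        cases hki : pvALPH_IDX.get? kc with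
        | none => simp only [hki]; rfl
        | some ki =>
          cases hp : PySem.List.pyGet? pvALPH (PySem.Int.mod (ki - ci) 26) with
          | none => simp only [hki, hp]; rfl
          | some p =>
            simp only [hki, hp]
            rw [List.append_assoc]
            exact ih (pt ++ [p]) primL

-- one step of A at position n, against the reference sequence
lemma stepA (ct prim : List Char) (n : Nat) (hn : n < ct.length)
    (hm : 0 < prim.length)
    (hct : ∀ k, k < ct.length → pvLet (ct.getD k 'A') = true)
    (hpr : ∀ r, r < prim.length → r < ct.length → pvLet (prim.getD r 'A') = true) :
    pvLoopA [((n : Int), ct.getD n 'A')] (ptSpec ct prim prim.length n)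
        (prim ++ ptSpec ct prim prim.length n) =
      some (ptSpec ct prim prim.length (n + 1)) := by
  set m := prim.length with hmdef
  have h1 : pvALPH_IDX.get? (ct.getD n 'A') = some (pvIdx (ct.getD n 'A')) :=
    pvLet_get _ (hct n hn)
  have hb := pvF_bounds ct prim m n
  by_cases hcase : n < m
  · -- key char comes from the primer
    have h2 : PySem.List.pyGet? (prim ++ ptSpec ct prim m n) (n : Int) = some (prim.getD n 'A') := by
      rw [PySem.List.pyGet?_natCast, List.getElem?_append_left (by omega : n < prim.length),
        List.getElem?_eq_getElem (by omega : n < prim.length),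
        List.getD_eq_getElem prim 'A' (by omega)]
    have h3 : pvALPH_IDX.get? (prim.getD n 'A') = some (pvIdx (prim.getD n 'A')) :=
      pvLet_get _ (hpr n (by omega) hn)
    have hF : PySem.Int.mod (pvIdx (prim.getD n 'A') - pvIdx (ct.getD n 'A')) 26 = pvF ct prim m n := by
      unfold pvF
      rw [Nat.mod_eq_of_lt hcase, chain_singleton m n hm hcase]
      simp
    have h4 : PySem.List.pyGet? pvALPH
        (PySem.Int.mod (pvIdx (prim.getD n 'A') - pvIdx (ct.getD n 'A')) 26) =
        some (pvChr (pvF ct prim m n)) := by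
      rw [hF]; exact (idx_chr _ hb.1 hb.2).1
    simp only [pvLoopA, h1, h2, h3, h4, ptSpec_succ]
  · -- key char comes from the plaintext already produced
    rw [not_lt] at hcase
    have h2 : PySem.List.pyGet? (prim ++ ptSpec ct prim m n) (n : Int) =
        some (pvChr (pvF ct prim m (n - m))) := by
      rw [PySem.List.pyGet?_natCast, List.getElem?_append_right (by omega : prim.length ≤ n)]
      exact ptSpec_getElem? ct prim m n (n - m) (by omega)
    have hbk := pvF_bounds ct prim m (n - m)
    have h3 : pvALPH_IDX.get? (pvChr (pvF ct prim m (n - m))) = some (pvF ct prim m (n - m)) :=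
      (idx_chr _ hbk.1 hbk.2).2
    have hF : PySem.Int.mod (pvF ct prim m (n - m) - pvIdx (ct.getD n 'A')) 26 = pvF ct prim m n := by
      unfold pvF
      rw [chain_split m n hm hcase]
      have hmodx : (n - m) % m = n % m := (Nat.mod_eq_sub_mod hcase).symm
      rw [hmodx]
      simp only [List.map_append, List.sum_append, List.map_cons, List.map_nil, List.sum_cons,
        List.sum_nil, Int.toNat_natCast]
      rw [PySem.Int.mod_eq_emod_of_pos (by norm_num), PySem.Int.mod_eq_emod_of_pos (by norm_num),
        PySem.Int.mod_eq_emod_of_pos (by norm_num)]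
      omega
    have h4 : PySem.List.pyGet? pvALPH
        (PySem.Int.mod (pvF ct prim m (n - m) - pvIdx (ct.getD n 'A')) 26) =
        some (pvChr (pvF ct prim m n)) := by
      rw [hF]; exact (idx_chr _ hb.1 hb.2).1
    simp only [pvLoopA, h1, h2, h3, h4, ptSpec_succ]

-- A's whole loop equals the reference sequence
lemma loopA_spec (ct prim : List Char)
    (hct : ∀ k, k < ct.length → pvLet (ct.getD k 'A') = true)
    (hpr : ∀ r, r < prim.length → r < ct.length → pvLet (prim.getD r 'A') = true)
    (hne : ct ≠ [] → prim ≠ []) :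
    ∀ n, n ≤ ct.length →
      pvLoopA (PySem.List.enumerate (ct.take n) 0) [] prim =
        some (ptSpec ct prim prim.length n) := by
  intro n
  induction n with
  | zero => intro _; simp [pvLoopA, ptSpec, PySem.List.enumerate_nil]
  | succ n ih =>
    intro hn1
    have hn : n < ct.length := by omega
    have hm : 0 < prim.length := by
      have : ct ≠ [] := by
        intro h; rw [h] at hn; simp at hn
      have := hne this
      exact List.length_pos_iff.mpr this
    rw [List.take_add_one, List.getElem?_eq_getElem hn]
    have hgd : ct[n] = ct.getD n 'A' := (List.getD_eq_getElem ct 'A' hn).symm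
    rw [hgd]
    simp only [Option.toList_some]
    rw [PySem.List.enumerate_append]
    have hlen : (ct.take n).length = n := by simp; omega
    rw [hlen]
    have hkey : prim = prim ++ ([] : List Char) := by simp
    rw [hkey, loopA_append, ← hkey]
    rw [ih (by omega)]
    simp only [Option.bind_some]
    have he1 : PySem.List.enumerate [ct.getD n 'A'] (0 + (n : Int)) = [((n : Int), ct.getD n 'A')] := by
      simp [PySem.List.enumerate_cons, PySem.List.enumerate_nil]
    rw [he1]
    exact stepA ct prim n hn hm hct hpr

-- B's outer loop splits over an append of its index list
lemma outerB_append (ct prim : List Char) (m : Int) (e1 e2 : List Int) :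
    ∀ (out : List Char),
    pvOuterB ct prim m (e1 ++ e2) out =
      (pvOuterB ct prim m e1 out).bind (fun out' => pvOuterB ct prim m e2 out') := by
  induction e1 with
  | nil => intro out; simp [pvOuterB]
  | cons i rest ih =>
    intro out
    simp only [List.cons_append]
    simp only [pvOuterB]
    cases h1 : PySem.Int.mod? i m with
    | none => rfl
    | some r =>
      cases h2 : PySem.List.pyGet? prim r with
      | none => simp only [h2]; rfl
      | some pc =>
        cases h3 : pvALPH_IDX.get? pc with
        | none => simp only [h2, h3]; rfl
        | some s0 =>
          cases h4 : pvChainB ct (PySem.List.pyRange r (i + 1) m) s0 with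
          | none => simp only [h2, h3, h4]; rfl
          | some s =>
            cases h5 : PySem.List.pyGet? pvALPH (PySem.Int.mod s 26) with
            | none => simp only [h2, h3, h4, h5]; rfl
            | some p =>
              simp only [h2, h3, h4, h5]
              exact ih (out ++ [p])

-- one step of B at position n, against the reference sequence
lemma stepB (ct prim : List Char) (n : Nat) (hn : n < ct.length)
    (hm : 0 < prim.length)
    (hct : ∀ k, k < ct.length → pvLet (ct.getD k 'A') = true)
    (hpr : ∀ r, r < prim.length → r < ct.length → pvLet (prim.getD r 'A') = true)
    (out : List Char) :
    pvOuterB ct prim (prim.length : Int) [(n : Int)] out =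
      some (out ++ [pvChr (pvF ct prim prim.length n)]) := by
  set m := prim.length with hmdef
  have hrm : n % m < m := Nat.mod_lt _ hm
  have h1 : PySem.Int.mod? (n : Int) (m : Int) = some ((n % m : Nat) : Int) := by
    unfold PySem.Int.mod?
    rw [if_neg (by exact_mod_cast hm.ne' : ((m : Nat) : Int) ≠ 0)]
    have hfm : ((n : Int)).fmod (m : Int) = PySem.Int.mod (n : Int) (m : Int) := rfl
    rw [hfm, PySem.Int.mod_natCast]
  have h2 : PySem.List.pyGet? prim ((n % m : Nat) : Int) = some (prim.getD (n % m) 'A') := by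
    rw [PySem.List.pyGet?_natCast, List.getElem?_eq_getElem (by omega : n % m < prim.length),
      List.getD_eq_getElem prim 'A' (by omega)]
  have h3 : pvALPH_IDX.get? (prim.getD (n % m) 'A') = some (pvIdx (prim.getD (n % m) 'A')) :=
    pvLet_get _ (hpr (n % m) (by omega) (by have := Nat.mod_le n m; omega))
  have h4 : pvChainB ct (PySem.List.pyRange ((n % m : Nat) : Int) ((n : Int) + 1) (m : Int))
      (pvIdx (prim.getD (n % m) 'A')) =
      some (pvIdx (prim.getD (n % m) 'A') -
        ((pvChain m n).map (fun j => pvIdx (ct.getD j.toNat 'A'))).sum) := by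
    have hchain : PySem.List.pyRange ((n % m : Nat) : Int) ((n : Int) + 1) (m : Int) = pvChain m n := rfl
    rw [hchain]
    apply chainB_spec
    intro j hj
    rw [pvChain, PySem.List.mem_pyRange_iff_of_pos (by exact_mod_cast hm : (0 : Int) < (m : Int))] at hj
    obtain ⟨hj1, hj2, _⟩ := hj
    have hj0 : 0 ≤ j := le_trans (by omega) hj1
    have hjl : j.toNat < ct.length := by omega
    exact ⟨hj0, hjl, hct j.toNat hjl⟩
  have hb := pvF_bounds ct prim m n
  have h5 : PySem.List.pyGet? pvALPH
      (PySem.Int.mod (pvIdx (prim.getD (n % m) 'A') -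
        ((pvChain m n).map (fun j => pvIdx (ct.getD j.toNat 'A'))).sum) 26) =
      some (pvChr (pvF ct prim m n)) := by
    have hFeq : PySem.Int.mod (pvIdx (prim.getD (n % m) 'A') -
        ((pvChain m n).map (fun j => pvIdx (ct.getD j.toNat 'A'))).sum) 26 = pvF ct prim m n := rfl
    rw [hFeq]; exact (idx_chr _ hb.1 hb.2).1
  simp only [pvOuterB, h1, h2, h3, h4, h5]

-- B's whole loop equals the reference sequence
lemma outerB_spec (ct prim : List Char)
    (hct : ∀ k, k < ct.length → pvLet (ct.getD k 'A') = true)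
    (hpr : ∀ r, r < prim.length → r < ct.length → pvLet (prim.getD r 'A') = true)
    (hne : ct ≠ [] → prim ≠ []) :
    ∀ n, n ≤ ct.length →
      pvOuterB ct prim (prim.length : Int) (PySem.List.pyRange 0 (n : Int) 1) [] =
        some (ptSpec ct prim prim.length n) := by
  intro n
  induction n with
  | zero => intro _; simp [pvOuterB, ptSpec]
  | succ n ih =>
    intro hn1
    have hn : n < ct.length := by omega
    have hm : 0 < prim.length := by
      have hcne : ct ≠ [] := by
        intro h; rw [h] at hn; simp at hn
      exact List.length_pos_iff.mpr (hne hcne)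
    have hcast : (((n + 1 : Nat)) : Int) = (n : Int) + 1 := by push_cast; ring
    rw [hcast, PySem.List.pyRange_one_succ_right (by omega : (0:Int) ≤ (n:Int))]
    rw [outerB_append, ih (by omega)]
    simp only [Option.bind_some]
    rw [ptSpec_succ]
    exact stepB ct prim n hn hm hct hpr _

-- ===== VERDICT (by name: the statement is the Claim_ definition above) =====
theorem autokey_pt_beau_decrypt_spec : Claim_equal_autokey_pt_beau_decrypt := by
  intro ct_str primer _ hpre
  obtain ⟨hct', hpr', hne⟩ := hpre
  set ct := ct_str.toList with hctdef
  set prim := primer.toList with hprimdef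
  have hct : ∀ k, k < ct.length → pvLet (ct.getD k 'A') = true := by
    intro k hk
    have := List.all_eq_true.mp hct' (ct.getD k 'A') ?_
    · exact this
    · rw [List.getD_eq_getElem ct 'A' hk]; exact List.getElem_mem hk
  have hpr : ∀ r, r < prim.length → r < ct.length → pvLet (prim.getD r 'A') = true := by
    intro r hr1 hr2
    have hmem : prim.getD r 'A' ∈ prim.take ct.length := by
      rw [List.getD_eq_getElem prim 'A' hr1]
      have : prim[r] = (prim.take ct.length)[r]'(by simp; omega) := by
        rw [List.getElem_take]
      rw [this]
      exact List.getElem_mem _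
    exact List.all_eq_true.mp hpr' _ hmem
  unfold Spec_autokey_pt_beau_decrypt autokey_pt_beau_decrypt autokey_pt_beau_decrypt_alt
  have hA := loopA_spec ct prim hct hpr hne ct.length (le_refl _)
  rw [List.take_length] at hA
  have hB := outerB_spec ct prim hct hpr hne ct.length (le_refl _)
  rw [← hctdef, ← hprimdef, hA, hB]
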